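-- pv_equiv track=rewrite | github.com/Hujunyan25/CreateFirstRepository | method.py | solution
-- ===== SOURCE A (Python) =====
-- def solution(list):
--     number = len(list)
--     num = max(list)
--     list2 = []
--     for i in range(number-1):
--         j=i+1
--         if(list[i]==list[j]):
--             list2.append(list[i])
--             list2.append(list[i])
--     # map=[0 for i in range(num+1)]
--     # for i in range(number):
--     #     map[list[i]]+=1
--     # for i in range(len(map)):
--     #     if(map[i]==2):
--     #         list2.append(list[i])
--     #         list2.append(list[i])
--         # if list[i]==list[i+1] and list[i]!=list[i-1]:
--         #     list2.append(list[i])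
--         #     list2.append(list[i])
--     return list2
-- ===== SOURCE B (Python) =====
-- def solution(list):
--     if not list:
--         return []
--     out = []
--     run_val, run_len = list[0], 1
--     for x in list[1:]:
--         if x == run_val:
--             run_len += 1
--         else:
--             out.extend([run_val] * (2 * (run_len - 1)))
--             run_val, run_len = x, 1
--     out.extend([run_val] * (2 * (run_len - 1)))
--     return out
-- ===== Notes on version B (the rewrite author's own statement) =====
-- stated objective: alternative
-- what changed: B replaces A's index-pair scan (range over i, comparing list[i]==list[i+1]) by a single run-length pass that emits each run's value 2*(L-1) times, and drops A's unused max(list) call (so B returns [] on the empty list, which Pre_ excludes because A raises there).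
import Mathlib
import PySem

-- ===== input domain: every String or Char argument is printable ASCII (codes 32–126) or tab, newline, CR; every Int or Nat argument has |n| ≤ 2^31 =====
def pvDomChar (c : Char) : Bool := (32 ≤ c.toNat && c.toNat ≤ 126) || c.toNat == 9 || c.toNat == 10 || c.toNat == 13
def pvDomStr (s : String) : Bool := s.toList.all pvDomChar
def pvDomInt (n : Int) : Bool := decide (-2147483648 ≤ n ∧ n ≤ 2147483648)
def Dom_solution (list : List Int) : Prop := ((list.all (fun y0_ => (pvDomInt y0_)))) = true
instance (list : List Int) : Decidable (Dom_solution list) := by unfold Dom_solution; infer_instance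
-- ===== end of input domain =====

-- B replaces A's index-pair scan by a single run-length pass (each run of length L emits its
-- value 2*(L-1) times) and drops A's unused max(list) call, so B returns [] where A raises.

-- ===== PORT A =====
-- num = max(list) raises ValueError on []; Pre_solution excludes the empty list,
-- so on admitted inputs the max call only evaluates and its value is unused.
def solution (list : List Int) : List Int :=
  let number : Int := list.length
  (PySem.List.pyRange 0 (number - 1) 1).foldl
    (fun list2 i =>
      let j := i + 1
      if PySem.List.pyGetD list i 0 = PySem.List.pyGetD list j 0 then
        (list2 ++ [PySem.List.pyGetD list i 0]) ++ [PySem.List.pyGetD list i 0]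
      else list2) []

-- ===== PORT B =====
-- state of Source B's loop: (out, run_val, run_len); 'out.extend([v] * (2*(L-1)))' = out ++ replicate (2*(L-1)) v
def solutionAltStep (st : List Int × Int × Nat) (x : Int) : List Int × Int × Nat :=
  match st with
  | (out, v, n) => if x = v then (out, v, n + 1) else (out ++ List.replicate (2 * (n - 1)) v, x, 1)

def solution_alt (list : List Int) : List Int :=
  match list with
  | [] => []
  | x :: xs =>
    let r := xs.foldl solutionAltStep ([], x, 1)
    r.1 ++ List.replicate (2 * (r.2.2 - 1)) r.2.1

-- ===== PRECONDITION & SPEC =====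
-- A's 'num = max(list)' raises ValueError on the empty list; Pre_ excludes exactly that input.
def Pre_solution (list : List Int) : Prop := list ≠ []
instance (list : List Int) : Decidable (Pre_solution list) := by unfold Pre_solution; infer_instance
def pvWitness_solution : List Int := [1, 1, 2]

-- (On the empty list A raises ValueError from its unused max(list) call; B returns [].)
def Spec_solution (list : List Int) (out : List Int) : Prop := out = solution_alt list
instance (list : List Int) (out : List Int) : Decidable (Spec_solution list out) := by
  unfold Spec_solution; infer_instance

-- ===== CLAIM (what is proved, stated in full; the proofs are below) =====
def Claim_equal_solution : Prop :=
  ∀ (list : List Int), Dom_solution list → Pre_solution list → Spec_solution list (solution list)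

-- ===== LEMMAS AND PROOFS =====

-- canonical form: adjacent equal pairs, each emitted twice
def adjPairs : List Int → List Int
  | x :: y :: rest => (if x = y then [x, x] else []) ++ adjPairs (y :: rest)
  | _ => []

-- ---- A side ----

theorem pyGetD_cons_shift (a : Int) (l : List Int) (k : Nat) :
    PySem.List.pyGetD (a :: l) ((k : Int) + 1) 0 = PySem.List.pyGetD l (k : Int) 0 := by
  have h : ((k : Int) + 1) = ((k + 1 : Nat) : Int) := by push_cast; ring
  rw [h, PySem.List.pyGetD_natCast, PySem.List.pyGetD_natCast]
  simp

theorem solution_eq_flatMap (l : List Int) :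
    solution l = (PySem.List.pyRange 0 ((l.length : Int) - 1) 1).flatMap
      (fun i => if PySem.List.pyGetD l i 0 = PySem.List.pyGetD l (i + 1) 0 then
          [PySem.List.pyGetD l i 0, PySem.List.pyGetD l i 0] else []) := by
  unfold solution
  show (PySem.List.pyRange 0 ((l.length : Int) - 1) 1).foldl
      (fun list2 i => if PySem.List.pyGetD l i 0 = PySem.List.pyGetD l (i + 1) 0 then
        (list2 ++ [PySem.List.pyGetD l i 0]) ++ [PySem.List.pyGetD l i 0] else list2) [] = _
  have hfun : (fun (list2 : List Int) i =>
      if PySem.List.pyGetD l i 0 = PySem.List.pyGetD l (i + 1) 0 then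
        (list2 ++ [PySem.List.pyGetD l i 0]) ++ [PySem.List.pyGetD l i 0] else list2)
      = (fun (list2 : List Int) i => list2 ++
        (if PySem.List.pyGetD l i 0 = PySem.List.pyGetD l (i + 1) 0 then
          [PySem.List.pyGetD l i 0, PySem.List.pyGetD l i 0] else [])) := by
    funext list2 i; split <;> simp
  rw [hfun, PySem.List.foldl_append_eq_flatMap]
  simp

theorem flatMap_range_adj (l : List Int) :
    (PySem.List.pyRange 0 ((l.length : Int) - 1) 1).flatMap
      (fun i => if PySem.List.pyGetD l i 0 = PySem.List.pyGetD l (i + 1) 0 then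
          [PySem.List.pyGetD l i 0, PySem.List.pyGetD l i 0] else []) = adjPairs l := by
  induction l with
  | nil => simp [adjPairs, PySem.List.pyRange_one_eq_nil]
  | cons x xs ih =>
    cases xs with
    | nil => simp [adjPairs, PySem.List.pyRange_one_eq_nil]
    | cons y rest =>
      rw [PySem.List.pyRange_one_cons (by simp only [List.length_cons]; push_cast; omega), List.flatMap_cons]
      have hshift : PySem.List.pyRange (0 + 1) (((x :: y :: rest).length : Int) - 1) 1
          = (PySem.List.pyRange 0 (((y :: rest).length : Int) - 1) 1).map (· + 1) := by
        rw [PySem.List.pyRange_one, PySem.List.pyRange_one]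
        simp [List.map_map, Function.comp]
        try exact fun a _ => by ring
      rw [hshift, List.flatMap_map]
      have hg : ∀ i ∈ PySem.List.pyRange 0 (((y :: rest).length : Int) - 1) 1,
          (fun i => if PySem.List.pyGetD (x :: y :: rest) i 0 = PySem.List.pyGetD (x :: y :: rest) (i + 1) 0 then
              [PySem.List.pyGetD (x :: y :: rest) i 0, PySem.List.pyGetD (x :: y :: rest) i 0] else []) (i + 1)
          = (fun i => if PySem.List.pyGetD (y :: rest) i 0 = PySem.List.pyGetD (y :: rest) (i + 1) 0 then
              [PySem.List.pyGetD (y :: rest) i 0, PySem.List.pyGetD (y :: rest) i 0] else []) i := by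
        intro i hi
        rw [PySem.List.mem_pyRange_one] at hi
        obtain ⟨k, rfl⟩ : ∃ k : Nat, i = (k : Int) := ⟨i.toNat, by omega⟩
        have h1 := pyGetD_cons_shift x (y :: rest) k
        have h2 : PySem.List.pyGetD (x :: y :: rest) ((k : Int) + 1 + 1) 0
            = PySem.List.pyGetD (y :: rest) ((k : Int) + 1) 0 := by
          have hk : (k : Int) + 1 + 1 = ((k + 1 : Nat) : Int) + 1 := by push_cast; ring
          have hk2 : (k : Int) + 1 = ((k + 1 : Nat) : Int) := by push_cast; ring
          rw [hk, hk2, pyGetD_cons_shift x (y :: rest) (k + 1)]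
        simp only [h1, h2]
      rw [List.flatMap_congr hg, ih]
      have hx0 : PySem.List.pyGetD (x :: y :: rest) 0 0 = x := PySem.List.pyGetD_zero_cons x (y :: rest) 0
      have hx1 : PySem.List.pyGetD (x :: y :: rest) (0 + 1) 0 = y := by
        have : (0 : Int) + 1 = ((0 : Nat) : Int) + 1 := by norm_num
        rw [this, pyGetD_cons_shift x (y :: rest) 0]
        exact PySem.List.pyGetD_zero_cons y rest 0
      simp only [adjPairs, hx0, hx1]

-- ---- B side ----

theorem solutionAlt_loop (xs : List Int) :
    ∀ (out : List Int) (v : Int) (n : Nat), 1 ≤ n →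
    (xs.foldl solutionAltStep (out, v, n)).1 ++
      List.replicate (2 * ((xs.foldl solutionAltStep (out, v, n)).2.2 - 1))
        (xs.foldl solutionAltStep (out, v, n)).2.1
    = out ++ List.replicate (2 * (n - 1)) v ++ adjPairs (v :: xs) := by
  induction xs with
  | nil => intro out v n _; simp [adjPairs]
  | cons x xs ih =>
    intro out v n hn
    by_cases hx : x = v
    · subst hx
      simp only [List.foldl_cons, solutionAltStep, if_pos]
      rw [ih out x (n + 1) (by omega)]
      have hrep : List.replicate (2 * n) x
          = List.replicate (2 * (n - 1)) x ++ [x, x] := by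
        have h2 : 2 * n = 2 * (n - 1) + 1 + 1 := by omega
        rw [h2, List.replicate_succ', List.replicate_succ']
        simp
      simp [adjPairs, hrep]
    · simp only [List.foldl_cons, solutionAltStep, if_neg hx]
      rw [ih (out ++ List.replicate (2 * (n - 1)) v) x 1 le_rfl]
      have hvx : ¬ v = x := fun h => hx h.symm
      simp [adjPairs, hvx]

theorem solution_alt_eq_adjPairs (l : List Int) (h : l ≠ []) : solution_alt l = adjPairs l := by
  cases l with
  | nil => exact absurd rfl h
  | cons x xs =>
    show (xs.foldl solutionAltStep ([], x, 1)).1 ++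
      List.replicate (2 * ((xs.foldl solutionAltStep ([], x, 1)).2.2 - 1))
        (xs.foldl solutionAltStep ([], x, 1)).2.1 = _
    rw [solutionAlt_loop xs [] x 1 le_rfl]
    simp

-- ===== VERDICT (by name: the statement is the Claim_ definition above) =====
theorem solution_spec : Claim_equal_solution := by
  intro l _ hpre
  unfold Spec_solution
  rw [solution_eq_flatMap, flatMap_range_adj, solution_alt_eq_adjPairs l hpre]
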